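-- pv_equiv track=rewrite | github.com/Steve-s2024/Competitive-Programming-root-folder | LeetCode root folder 2/Check If a String Contains All Binary Codes of Size K.py | hasAllCodes
-- ===== SOURCE A (Python) =====
-- def hasAllCodes(s: str, k: int) -> bool:
--     hashSet = set()
--     n = len(s)
--     l, r = 0, k-1
--     while r < n:
--         hashSet.add(s[l:r+1])
--         r += 1
--         l += 1
--     return len(hashSet) == 1 << k
-- ===== SOURCE B (Python) =====
-- def hasAllCodes(s: str, k: int) -> bool:
--     n = len(s)
--     target = 1 << k
--     if n - k + 1 < target:
--         return False  # fewer windows than codes needed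
--     mod = 128 ** k
--     code = 0
--     for i in range(k):
--         code = code * 128 + ord(s[i])
--     seen = {code}
--     for i in range(k, n):
--         code = (code * 128 + ord(s[i])) % mod
--         seen.add(code)
--     return len(seen) == target
-- ===== Notes on version B (the rewrite author's own statement) =====
-- stated objective: faster
-- what changed: Replaces A's per-position string slicing (building and hashing a fresh k-character substring for every window) by a rolling base-128 window code maintained with one multiply-add-mod per character and stored in a set of ints, plus an early exit when the string has fewer than 2^k windows.
import Mathlib
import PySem

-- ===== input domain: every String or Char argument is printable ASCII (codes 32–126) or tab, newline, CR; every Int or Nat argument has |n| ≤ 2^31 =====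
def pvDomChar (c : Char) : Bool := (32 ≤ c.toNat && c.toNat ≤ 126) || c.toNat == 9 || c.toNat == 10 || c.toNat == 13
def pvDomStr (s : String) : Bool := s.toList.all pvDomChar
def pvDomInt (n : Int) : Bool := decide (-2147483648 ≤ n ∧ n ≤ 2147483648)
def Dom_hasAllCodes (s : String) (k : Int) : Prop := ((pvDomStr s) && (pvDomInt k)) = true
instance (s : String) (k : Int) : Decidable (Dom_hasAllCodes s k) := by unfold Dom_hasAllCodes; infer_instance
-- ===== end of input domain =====

-- B replaces A's set of sliced substrings by a rolling base-128 window code kept in a set of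
-- integers (one O(1)-ish update per position instead of materialising each k-slice), plus an
-- early exit when the string has fewer than 2^k windows.

-- ===== PORT A =====
-- A's while-loop as fuel recursion; fuel = (n - r).toNat is exactly the remaining iteration
-- count (r increases by 1 per pass). The set stores the slices as List Char: Python string
-- equality coincides with char-list equality, so the set is exact.
def hasAllCodesLoopA (cs : List Char) (n : Int) :
    Nat → Int → Int → PySem.Set (List Char) → PySem.Set (List Char)
  | 0, _, _, hs => hs
  | fuel+1, l, r, hs =>
    if r < n then
      hasAllCodesLoopA cs n fuel (l+1) (r+1)
        (PySem.Set.add hs (PySem.List.slice cs (some l) (some (r+1))))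
    else hs

def hasAllCodes (s : String) (k : Int) : Bool :=
  let cs := s.toList
  let n : Int := cs.length
  let hs := hasAllCodesLoopA cs n (n - (k-1)).toNat 0 (k-1) PySem.Set.empty
  decide (PySem.Set.len hs = ((1 <<< k.toNat : Nat) : Int))   -- len(hashSet) == 1 << k (k ≥ 0 under Pre_)

-- ===== PORT B =====
-- code = code * 128 + ord(c); every intermediate Python int here is nonnegative, so Nat
-- arithmetic (including %) computes exactly what Python computes.
def pvEncodeStep (a : Nat) (c : Char) : Nat := a * 128 + c.toNat

-- loop body of 'for i in range(k, n)': code = (code*128 + ord(s[i])) % mod; seen.add(code)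
def hasAllCodesAltStep (m : Nat) (st : Nat × PySem.Set Nat) (c : Char) : Nat × PySem.Set Nat :=
  let code' := (pvEncodeStep st.1 c) % m
  (code', PySem.Set.add st.2 code')

def hasAllCodes_alt (s : String) (k : Int) : Bool :=
  let cs := s.toList
  let n : Int := cs.length
  let target : Nat := 1 <<< k.toNat                       -- target = 1 << k (k ≥ 0 under Pre_)
  if n - k + 1 < (target : Int) then false                -- fewer windows than codes needed
  else
    let K := k.toNat
    let m : Nat := 128 ^ K                                -- mod = 128 ** k
    let code0 : Nat := (cs.take K).foldl pvEncodeStep 0   -- for i in range(k): code = code*128 + ord(s[i])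
    let r := (cs.drop K).foldl (hasAllCodesAltStep m)     -- for i in range(k, n): …
      (code0, PySem.Set.ofList [code0])                   -- seen = {code}
    decide (PySem.Set.len r.2 = (target : Int))           -- len(seen) == target

-- ===== PRECONDITION & SPEC =====
-- Pre_ excludes exactly k < 0, on which A raises ValueError ('1 << k' with negative k).
def Pre_hasAllCodes (s : String) (k : Int) : Prop := 0 ≤ k
instance (s : String) (k : Int) : Decidable (Pre_hasAllCodes s k) := by unfold Pre_hasAllCodes; infer_instance
def pvWitness_hasAllCodes : String × Int := ("0110", 1)

def Spec_hasAllCodes (s : String) (k : Int) (out : Bool) : Prop := out = hasAllCodes_alt s k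
instance (s : String) (k : Int) (out : Bool) : Decidable (Spec_hasAllCodes s k out) := by unfold Spec_hasAllCodes; infer_instance

-- ===== CLAIM (what is proved, stated in full; the proofs are below) =====
def Claim_equal_hasAllCodes : Prop := ∀ (s : String) (k : Int), Dom_hasAllCodes s k → Pre_hasAllCodes s k → Spec_hasAllCodes s k (hasAllCodes s k)

-- ===== LEMMAS AND PROOFS =====

-- base-128 value of a window, and the window at offset i
def pvEncode (w : List Char) : Nat := w.foldl pvEncodeStep 0
def pvWin (cs : List Char) (K i : Nat) : List Char := (cs.drop i).take K

-- the chain of successive windows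
def pvWins : List Char → List Char → List (List Char)
  | _, [] => []
  | w, c :: t => ((w ++ [c]).drop 1) :: pvWins ((w ++ [c]).drop 1) t

lemma pvEncode_foldl (w : List Char) : ∀ (a : Nat), w.foldl pvEncodeStep a = a * 128 ^ w.length + pvEncode w := by
  induction w with
  | nil => intro a; simp [pvEncode]
  | cons c t ih =>
    intro a
    simp only [List.foldl_cons, pvEncode, List.length_cons]
    rw [ih, ih (pvEncodeStep 0 c)]
    simp only [pvEncodeStep, Nat.zero_mul, Nat.zero_add, pow_succ]
    ring

lemma pvEncode_lt (w : List Char) (h : ∀ c ∈ w, c.toNat < 128) : pvEncode w < 128 ^ w.length := by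
  induction w with
  | nil => simp [pvEncode]
  | cons c t ih =>
    have hc := h c (by simp)
    have ht := ih (fun d hd => h d (by simp [hd]))
    simp only [pvEncode, List.foldl_cons] at *
    rw [pvEncode_foldl]
    simp only [pvEncodeStep, Nat.zero_mul, Nat.zero_add, List.length_cons, pow_succ]
    calc c.toNat * 128 ^ t.length + pvEncode t
        < (c.toNat + 1) * 128 ^ t.length := by
          simpa [Nat.add_mul] using ht
      _ ≤ 128 ^ t.length * 128 := by
          rw [Nat.mul_comm (128 ^ t.length) 128]
          exact Nat.mul_le_mul_right _ (by omega)

lemma pvEncode_cons (c : Char) (t : List Char) : pvEncode (c :: t) = c.toNat * 128 ^ t.length + pvEncode t := by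
  simp only [pvEncode, List.foldl_cons]
  rw [pvEncode_foldl]
  simp [pvEncodeStep, pvEncode]

lemma pvEncode_inj (w₁ : List Char) : ∀ (w₂ : List Char), w₁.length = w₂.length →
    (∀ c ∈ w₁, c.toNat < 128) → (∀ c ∈ w₂, c.toNat < 128) →
    pvEncode w₁ = pvEncode w₂ → w₁ = w₂ := by
  induction w₁ with
  | nil => intro w₂ hl _ _ _; exact ((List.length_eq_zero_iff).mp hl.symm).symm
  | cons c t ih =>
    intro w₂ hl h₁ h₂ he
    cases w₂ with
    | nil => simp at hl
    | cons d u =>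
      simp only [List.length_cons, Nat.add_right_cancel_iff] at hl
      rw [pvEncode_cons, pvEncode_cons, hl] at he
      have ht : pvEncode t < 128 ^ u.length := by
        rw [← hl]; exact pvEncode_lt t (fun x hx => h₁ x (by simp [hx]))
      have hu : pvEncode u < 128 ^ u.length := pvEncode_lt u (fun x hx => h₂ x (by simp [hx]))
      have hP : 0 < 128 ^ u.length := Nat.pow_pos (by norm_num)
      have hc1 : c.toNat = (c.toNat * 128 ^ u.length + pvEncode t) / 128 ^ u.length := by
        rw [Nat.add_comm, Nat.add_mul_div_right _ _ hP, Nat.div_eq_of_lt ht, Nat.zero_add]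
      have hc2 : d.toNat = (d.toNat * 128 ^ u.length + pvEncode u) / 128 ^ u.length := by
        rw [Nat.add_comm, Nat.add_mul_div_right _ _ hP, Nat.div_eq_of_lt hu, Nat.zero_add]
      have hcd : c.toNat = d.toNat := by rw [hc1, he, ← hc2]
      have hce : c = d := by
        apply Char.ext; unfold Char.toNat at hcd; exact UInt32.toNat_inj.mp hcd
      rw [hcd] at he
      have hte : pvEncode t = pvEncode u := Nat.add_left_cancel he
      rw [hce, ih u hl (fun x hx => h₁ x (by simp [hx])) (fun x hx => h₂ x (by simp [hx])) hte]

lemma pvEncode_roll (K : Nat) (w : List Char) (c : Char) (hl : w.length = K)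
    (hw : ∀ d ∈ w, d.toNat < 128) (hc : c.toNat < 128) :
    (pvEncode w * 128 + c.toNat) % 128 ^ K = pvEncode ((w ++ [c]).drop 1) := by
  have happ : pvEncode (w ++ [c]) = pvEncode w * 128 + c.toNat := by
    simp only [pvEncode, List.foldl_append, List.foldl_cons, List.foldl_nil]
    simp [pvEncodeStep]
  cases w with
  | nil =>
    simp at hl
    subst hl
    simp [pvEncode, List.foldl, Nat.mod_one]
  | cons d t =>
    have hdrop : ((d :: t) ++ [c]).drop 1 = t ++ [c] := by simp
    rw [hdrop]
    have hlen : (t ++ [c]).length = K := by simp at hl ⊢; omega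
    have hlt : pvEncode (t ++ [c]) < 128 ^ K := by
      rw [← hlen]
      exact pvEncode_lt _ (by
        intro x hx
        rcases List.mem_append.mp hx with h | h
        · exact hw x (by simp [h])
        · simp at h; subst h; exact hc)
    have : pvEncode (d :: t) * 128 + c.toNat = d.toNat * 128 ^ K + pvEncode (t ++ [c]) := by
      rw [pvEncode_cons]
      have : pvEncode (t ++ [c]) = pvEncode t * 128 + c.toNat := by
        simp only [pvEncode, List.foldl_append, List.foldl_cons, List.foldl_nil]
        simp [pvEncodeStep]
      rw [this]
      have hK : K = t.length + 1 := by simp at hl; omega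
      rw [hK, pow_succ]
      ring
    rw [this, Nat.mul_add_mod' , Nat.mod_eq_of_lt hlt]


-- A's loop adds, in order, the slices at offsets 0,1,…,fuel-1
lemma loopA_spec (cs : List Char) (n : Int) :
    ∀ (fuel : Nat) (l r : Int) (hs : PySem.Set (List Char)), fuel = (n - r).toNat →
    hasAllCodesLoopA cs n fuel l r hs
      = PySem.Set.update hs ((List.range fuel).map
          (fun i : Nat => PySem.List.slice cs (some (l + (i : Int))) (some (r + 1 + (i : Int))))) := by
  intro fuel
  induction fuel with
  | zero => intro l r hs _; simp [hasAllCodesLoopA, PySem.Set.update]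
  | succ f ih =>
    intro l r hs hf
    have hr : r < n := by omega
    simp only [hasAllCodesLoopA, if_pos hr]
    have hsplit : (List.range (f+1)).map (fun i : Nat => PySem.List.slice cs (some (l + (i : Int))) (some (r + 1 + (i : Int))))
        = PySem.List.slice cs (some l) (some (r+1)) ::
          (List.range f).map (fun i : Nat => PySem.List.slice cs (some (l + 1 + (i : Int))) (some (r + 1 + 1 + (i : Int)))) := by
      rw [List.range_succ_eq_map, List.map_cons, List.map_map]
      congr 1
      · simp
      · apply List.map_congr_left
        intro i _
        simp only [Function.comp_apply]
        congr 2 <;> push_cast <;> ring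
    rw [hsplit]
    simp only [PySem.Set.update, List.foldl_cons]
    simpa only [PySem.Set.update] using ih (l+1) (r+1) _ (by omega)

-- B's fold: the running code is always the encoding of the current window, and the set
-- collects the encodings of the successive windows
lemma foldB_spec (K : Nat) :
    ∀ (t w : List Char) (seen : PySem.Set Nat), w.length = K →
    (∀ d ∈ w, d.toNat < 128) → (∀ d ∈ t, d.toNat < 128) →
    t.foldl (hasAllCodesAltStep (128 ^ K)) (pvEncode w, seen)
      = (pvEncode (t.foldl (fun w' c => (w' ++ [c]).drop 1) w),
         PySem.Set.update seen ((pvWins w t).map pvEncode)) := by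
  intro t
  induction t with
  | nil => intro w seen _ _ _; simp [pvWins, PySem.Set.update]
  | cons c t ih =>
    intro w seen hl hw hct
    have hc : c.toNat < 128 := hct c (by simp)
    have hstep : hasAllCodesAltStep (128 ^ K) (pvEncode w, seen) c
        = (pvEncode ((w ++ [c]).drop 1), PySem.Set.add seen (pvEncode ((w ++ [c]).drop 1))) := by
      simp only [hasAllCodesAltStep, pvEncodeStep]
      rw [pvEncode_roll K w c hl hw hc]
    have hl' : ((w ++ [c]).drop 1).length = K := by simp [hl]
    have hw' : ∀ d ∈ (w ++ [c]).drop 1, d.toNat < 128 := by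
      intro d hd
      rcases List.mem_append.mp (List.mem_of_mem_drop hd) with h | h
      · exact hw d h
      · simp at h; subst h; exact hc
    simp only [List.foldl_cons, hstep]
    rw [ih _ _ hl' hw' (fun d hd => hct d (by simp [hd]))]
    simp [pvWins, PySem.Set.update]

-- the successive windows over cs are exactly the slices at offsets i+1, i+2, …
lemma pvWins_eq (cs : List Char) (K : Nat) :
    ∀ (t : List Char) (i : Nat), cs.drop (i + K) = t → i + K ≤ cs.length →
    pvWins (pvWin cs K i) t = (List.range t.length).map (fun j => pvWin cs K (i + 1 + j)) := by
  intro t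
  induction t with
  | nil => intro i _ _; simp [pvWins]
  | cons c t ih =>
    intro i hdrop hle
    have hlen : cs.length - (i + K) = t.length + 1 := by
      have := congrArg List.length hdrop; simpa using this
    have hi : i + K < cs.length := by omega
    have hget : (cs.drop i)[K]? = some c := by
      rw [List.getElem?_drop]
      have := congrArg (fun l => l[0]?) hdrop
      simpa using this
    have hkey : (pvWin cs K i ++ [c]).drop 1 = pvWin cs K (i + 1) := by
      have h1 : pvWin cs K i ++ [c] = (cs.drop i).take (K + 1) := by
        rw [List.take_add_one, hget]; rfl
      rw [h1, List.drop_take, List.drop_drop]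
      simp [pvWin]
    have hdrop' : cs.drop ((i + 1) + K) = t := by
      have := congrArg (List.drop 1) hdrop
      rw [List.drop_drop] at this
      simpa [Nat.add_comm, Nat.add_left_comm] using this
    simp only [pvWins, hkey]
    rw [ih (i + 1) hdrop' (by omega)]
    simp only [List.length_cons]
    rw [List.range_succ_eq_map]
    simp only [List.map_cons, List.map_map]
    congr 1
    apply List.map_congr_left
    intro j _
    simp only [Function.comp_apply, pvWin]
    congr 2
    omega

-- pushing an injective function through the set-building fold
lemma foldl_add_map (f : List Char → Nat) (P : List Char → Prop)
    (hinj : ∀ a b, P a → P b → f a = f b → a = b) :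
    ∀ (xs s : List (List Char)), (∀ w ∈ s, P w) → (∀ w ∈ xs, P w) →
    List.foldl PySem.Set.add (s.map f) (xs.map f) = (List.foldl PySem.Set.add s xs).map f := by
  intro xs
  induction xs with
  | nil => intro s _ _; simp
  | cons x xs ih =>
    intro s hs hxs
    have hx : P x := hxs x (by simp)
    have hadd : PySem.Set.add (s.map f) (f x) = (PySem.Set.add s x).map f := by
      have hmem : (f x ∈ s.map f) ↔ (x ∈ s) := by
        constructor
        · intro h
          obtain ⟨b, hb, hfb⟩ := List.mem_map.mp h
          exact (hinj b x (hs b hb) hx hfb) ▸ hb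
        · exact fun h => List.mem_map.mpr ⟨x, h, rfl⟩
      simp only [PySem.Set.add, PySem.Set.contains, List.contains_iff_mem]
      by_cases h : x ∈ s
      · simp [h, hmem.mpr h]
      · simp [h, hmem, List.map_append]
    rw [List.map_cons, List.foldl_cons, List.foldl_cons, hadd]
    exact ih (PySem.Set.add s x) (by
      intro w hw
      simp only [PySem.Set.add] at hw
      by_cases h : PySem.Set.contains s x
      · rw [if_pos h] at hw; exact hs w hw
      · rw [if_neg h] at hw
        rcases List.mem_append.mp hw with h' | h'
        · exact hs w h'
        · simp at h'; subst h'; exact hx) (fun w hw => hxs w (by simp [hw]))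

lemma len_foldl_add_le {α : Type} [BEq α] :
    ∀ (xs s : List α), (List.foldl PySem.Set.add s xs).length ≤ s.length + xs.length := by
  intro xs
  induction xs with
  | nil => simp
  | cons x xs ih =>
    intro s
    rw [List.foldl_cons]
    refine le_trans (ih (PySem.Set.add s x)) ?_
    have : (PySem.Set.add s x).length ≤ s.length + 1 := by
      simp only [PySem.Set.add]
      split <;> simp
    simp only [List.length_cons]
    omega

-- members of the window list: right length, ASCII digits
lemma pvWin_ok (cs : List Char) (K i : Nat) (hdig : ∀ c ∈ cs, c.toNat < 128)
    (h : i + K ≤ cs.length) :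
    (pvWin cs K i).length = K ∧ ∀ c ∈ pvWin cs K i, c.toNat < 128 := by
  constructor
  · simp only [pvWin, List.length_take, List.length_drop]; omega
  · intro c hc
    exact hdig c (List.mem_of_mem_drop (List.mem_of_mem_take hc))

-- case 'fewer windows than codes': A's set is too small to have 2^k elements
lemma small_ne (L : List (List Char)) (k : Int) (n : Nat)
    (hL : L.length = ((n : Int) - (k-1)).toNat)
    (hlt : (n : Int) - k + 1 < ((2 ^ k.toNat : Nat) : Int)) :
    ¬ (((List.foldl PySem.Set.add [] L).length : Int) = ((2 ^ k.toNat : Nat) : Int)) := by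
  have h1 := len_foldl_add_le L []
  have hT : 0 < 2 ^ k.toNat := Nat.pow_pos (by norm_num)
  simp only [List.length_nil] at h1
  intro hcon
  omega

-- ===== VERDICT (by name: the statement is the Claim_ definition above) =====
theorem hasAllCodes_spec : Claim_equal_hasAllCodes := by
  intro s k hDom hPre
  have hPre' : 0 ≤ k := hPre
  have hk : ((k.toNat : Int)) = k := Int.toNat_of_nonneg hPre'
  have hdig : ∀ c ∈ s.toList, c.toNat < 128 := by
    intro c hc
    have hD : pvDomStr s = true := by
      unfold Dom_hasAllCodes at hDom
      simp only [Bool.and_eq_true] at hDom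
      exact hDom.1
    unfold pvDomStr at hD
    rw [List.all_eq_true] at hD
    have := hD c hc
    unfold pvDomChar at this
    simp at this
    omega
  show hasAllCodes s k = hasAllCodes_alt s k
  simp only [hasAllCodes, hasAllCodes_alt]
  have hsh : (1 <<< k.toNat : Nat) = 2 ^ k.toNat := by simp [Nat.shiftLeft_eq]
  have hT : 0 < 2 ^ k.toNat := Nat.pow_pos (by norm_num)
  split_ifs with hlt
  · rw [hsh] at hlt ⊢
    apply decide_eq_false
    rw [loopA_spec s.toList (s.toList.length : Int) _ 0 (k-1) _ rfl]
    simp only [PySem.Set.update, PySem.Set.len, PySem.Set.empty]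
    exact small_ne _ k _ (by simp) hlt
  · rw [hsh] at hlt
    have hKN : k.toNat ≤ s.toList.length := by omega
    -- abbreviations
    set cs := s.toList with hcs
    set K := k.toNat with hKdef
    set N := cs.length with hNdef
    -- the A-side list of slices is the window list
    have hF : ((N : Int) - (k-1)).toNat = (N - K) + 1 := by omega
    have hAside : hasAllCodesLoopA cs (N : Int) ((N : Int) - (k-1)).toNat 0 (k-1) PySem.Set.empty
        = List.foldl PySem.Set.add [pvWin cs K 0]
            ((List.range (N - K)).map (fun j => pvWin cs K (1 + j))) := by
      rw [loopA_spec cs (N : Int) _ 0 (k-1) _ rfl]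
      have hmap : (List.range (((N : Int) - (k-1)).toNat)).map
          (fun i : Nat => PySem.List.slice cs (some ((0:Int) + (i : Int))) (some ((k-1) + 1 + (i : Int))))
          = (List.range ((N - K) + 1)).map (fun i => pvWin cs K i) := by
        rw [hF]
        apply List.map_congr_left
        intro i _
        have h1 : ((0:Int) + (i : Int)) = ((i : Nat) : Int) := by ring
        have h2 : ((k-1) + 1 + (i : Int)) = (((i + K) : Nat) : Int) := by
          rw [← hk]; push_cast; ring
        rw [h1, h2, PySem.List.slice_natCast]
        simp [pvWin]
      rw [hmap, List.range_succ_eq_map, List.map_cons, List.map_map]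
      simp only [PySem.Set.update, List.foldl_cons]
      have hadd : PySem.Set.add (PySem.Set.empty : PySem.Set (List Char)) (pvWin cs K 0)
          = [pvWin cs K 0] := by
        simp [PySem.Set.add, PySem.Set.empty, PySem.Set.contains]
      rw [hadd]
      congr 1
      apply List.map_congr_left
      intro j _
      simp only [Function.comp_apply]
      congr 1
      omega
    -- the B-side fold collects the window codes
    have hw0 : cs.take K = pvWin cs K 0 := by simp [pvWin]
    have hw0len : (pvWin cs K 0).length = K := (pvWin_ok cs K 0 hdig (by omega)).1
    have hw0dig : ∀ d ∈ pvWin cs K 0, d.toNat < 128 := (pvWin_ok cs K 0 hdig (by omega)).2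
    have htdig : ∀ d ∈ cs.drop K, d.toNat < 128 := fun d hd => hdig d (List.mem_of_mem_drop hd)
    have hBfold : ((cs.drop K).foldl (hasAllCodesAltStep (128 ^ K))
          ((cs.take K).foldl pvEncodeStep 0, PySem.Set.ofList [(cs.take K).foldl pvEncodeStep 0])).2
        = List.foldl PySem.Set.add [pvEncode (pvWin cs K 0)]
            (((List.range (N - K)).map (fun j => pvWin cs K (1 + j))).map pvEncode) := by
      have hcode0 : (cs.take K).foldl pvEncodeStep 0 = pvEncode (pvWin cs K 0) := by
        rw [hw0]; rfl
      rw [hcode0]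
      rw [foldB_spec K (cs.drop K) (pvWin cs K 0) _ hw0len hw0dig htdig]
      have hwins : pvWins (pvWin cs K 0) (cs.drop K)
          = (List.range (N - K)).map (fun j => pvWin cs K (1 + j)) := by
        have := pvWins_eq cs K (cs.drop K) 0 (by simp) (by omega)
        rw [this]
        simp only [List.length_drop]
        apply List.map_congr_left
        intro j _
        rfl
      rw [hwins]
      have hofl : (PySem.Set.ofList [pvEncode (pvWin cs K 0)] : PySem.Set Nat)
          = [pvEncode (pvWin cs K 0)] := by
        simp [PySem.Set.ofList_eq_foldl, PySem.Set.add, PySem.Set.contains]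
      rw [hofl]
      simp [PySem.Set.update]
    -- encode is injective on the windows
    have hmapset : List.foldl PySem.Set.add ([pvWin cs K 0].map pvEncode)
          ((((List.range (N - K)).map (fun j => pvWin cs K (1 + j)))).map pvEncode)
        = (List.foldl PySem.Set.add [pvWin cs K 0]
            ((List.range (N - K)).map (fun j => pvWin cs K (1 + j)))).map pvEncode := by
      apply foldl_add_map pvEncode (fun w => w.length = K ∧ ∀ c ∈ w, c.toNat < 128)
      · intro a b ha hb he
        exact pvEncode_inj a b (ha.1.trans hb.1.symm) ha.2 hb.2 he
      · intro w hw
        simp at hw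
        subst hw
        exact pvWin_ok cs K 0 hdig (by omega)
      · intro w hw
        obtain ⟨j, hj, rfl⟩ := List.mem_map.mp hw
        rw [List.mem_range] at hj
        exact pvWin_ok cs K (1 + j) hdig (by omega)
    rw [hAside, hBfold]
    rw [show [pvEncode (pvWin cs K 0)] = [pvWin cs K 0].map pvEncode from rfl, hmapset]
    simp [PySem.Set.len]
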